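-- pv_equiv track=rewrite | github.com/aldwinb/sari-sari-store | python/advent/Day1.py | count_parens
-- ===== SOURCE A (Python) =====
-- def count_parens(parens):
--     if not parens or len(parens) == 0:
--         return 0
--
--     count = 0
--     for p in parens:
--         if p == '(':
--             count = count+1
--         else:
--             count = count-1
--
--     return count
-- ===== SOURCE B (Python) =====
-- def count_parens(parens):
--     # Divide and conquer: the signed paren count is additive over concatenation,
--     # so split the range in half, solve each half recursively, and add.
--     def go(lo, hi):
--         if hi == lo:
--             return 0
--         if hi == lo + 1:
--             return 1 if parens[lo] == '(' else -1
--         mid = (lo + hi) // 2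
--         return go(lo, mid) + go(mid, hi)
--     return go(0, len(parens))
-- ===== Notes on version B (the rewrite author's own statement) =====
-- stated objective: alternative
-- what changed: Replaces the linear accumulator loop with a divide-and-conquer recursion that splits the string in half and adds the two halves' signed counts, exploiting additivity over concatenation.
import Mathlib
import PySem

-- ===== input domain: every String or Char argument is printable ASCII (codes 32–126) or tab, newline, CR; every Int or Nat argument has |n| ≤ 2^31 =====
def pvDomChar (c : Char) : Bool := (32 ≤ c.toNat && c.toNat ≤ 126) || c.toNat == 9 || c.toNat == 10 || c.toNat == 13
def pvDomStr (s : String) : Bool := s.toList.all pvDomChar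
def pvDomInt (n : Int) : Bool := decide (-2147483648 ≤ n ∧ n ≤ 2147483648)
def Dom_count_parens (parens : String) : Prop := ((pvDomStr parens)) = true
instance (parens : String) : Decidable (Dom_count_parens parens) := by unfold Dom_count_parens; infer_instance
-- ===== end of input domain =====

-- B replaces A's linear accumulator loop with a divide-and-conquer recursion
-- (split in half, add the halves' signed counts); same O(n) cost, different decomposition.

-- ===== PORT A =====
def count_parens (parens : String) : Int :=
  if parens = "" ∨ PySem.Str.len parens = 0 then 0
  else parens.toList.foldl (fun count p => if p = '(' then count + 1 else count - 1) 0

-- ===== PORT B =====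
-- B's inner go(lo, hi) works on the half-open slice parens[lo:hi]; we port it as
-- recursion on that slice (a List Char), splitting at mid = length / 2 exactly as
-- go splits at (lo+hi)//2.
def cpGo (l : List Char) : Int :=
  if l.length = 0 then 0
  else if l.length = 1 then (if l.headI = '(' then 1 else -1)
  else cpGo (l.take (l.length / 2)) + cpGo (l.drop (l.length / 2))
termination_by l.length
decreasing_by
  · simp only [List.length_take]; omega
  · simp only [List.length_drop]; omega

def count_parens_alt (parens : String) : Int := cpGo parens.toList

-- ===== PRECONDITION & SPEC =====
def Spec_count_parens (parens : String) (out : Int) : Prop := out = count_parens_alt parens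
instance (parens : String) (out : Int) : Decidable (Spec_count_parens parens out) := by unfold Spec_count_parens; infer_instance

-- ===== CLAIM (what is proved, stated in full; the proofs are below) =====
def Claim_equal_count_parens : Prop := ∀ (parens : String), Dom_count_parens parens → Spec_count_parens parens (count_parens parens)

-- ===== LEMMAS AND PROOFS =====

-- A's fold computes the signed count 2*#'(' - length.
theorem foldl_paren (l : List Char) (a : Int) :
    l.foldl (fun count p => if p = '(' then count + 1 else count - 1) a
      = a + 2 * (l.count '(' : Int) - (l.length : Int) := by
  induction l generalizing a with
  | nil => simp
  | cons x t ih =>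
    by_cases hx : x = '('
    · simp [List.foldl_cons, hx, ih]; ring
    · simp [List.foldl_cons, hx, ih]; ring

-- B's divide-and-conquer computes the same signed count.
theorem cpGo_eq (l : List Char) : cpGo l = 2 * (l.count '(' : Int) - (l.length : Int) := by
  fun_induction cpGo l with
  | case1 l h0 => simp_all
  | case2 l h0 h1 hh =>
    obtain ⟨c, rfl⟩ := List.length_eq_one_iff.mp h1
    simp_all [List.headI]
  | case3 l h0 h1 hh =>
    obtain ⟨c, rfl⟩ := List.length_eq_one_iff.mp h1
    simp_all [List.headI]
  | case4 l h0 h1 ih1 ih2 =>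
    rw [ih1, ih2]
    have hc : (l.take (l.length / 2)).count '(' + (l.drop (l.length / 2)).count '(' = l.count '(' := by
      rw [← List.count_append, List.take_append_drop]
    have hl : (l.take (l.length / 2)).length + (l.drop (l.length / 2)).length = l.length := by
      simp only [List.length_take, List.length_drop]; omega
    have hc' : ((l.take (l.length / 2)).count '(' : Int) + ((l.drop (l.length / 2)).count '(' : Int) = (l.count '(' : Int) := by
      exact_mod_cast congrArg (Nat.cast : Nat → Int) hc
    have hl' : ((l.take (l.length / 2)).length : Int) + ((l.drop (l.length / 2)).length : Int) = (l.length : Int) := by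
      exact_mod_cast congrArg (Nat.cast : Nat → Int) hl
    omega

-- ===== VERDICT (by name: the statement is the Claim_ definition above) =====
theorem count_parens_spec : Claim_equal_count_parens := by
  intro parens _
  unfold Spec_count_parens count_parens count_parens_alt
  rw [cpGo_eq]
  by_cases h : parens = ""
  · simp [h]
  · have hlen : PySem.Str.len parens ≠ 0 := by
      rw [PySem.Str.len_eq]
      simp only [ne_eq, Nat.cast_eq_zero, List.length_eq_zero_iff, String.toList_eq_nil_iff]
      exact h
    simp only [h, hlen, or_self, if_false]
    rw [foldl_paren]
    ring
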